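-- pv_equiv track=rewrite | github.com/justcarlux/abstraccion-proyecto-final | 7/Sopa_de_letras_OAD-3.py | es_seleccion_valida
-- ===== SOURCE A (Python) =====
-- def es_seleccion_valida(seleccion, direcciones_permitidas):
--     if len(seleccion) < 2:
--         return False, None
--     f0, c0 = seleccion[0]
--     f1, c1 = seleccion[-1]
--     df = f1 - f0
--     dc = c1 - c0
--     # Normalizar dirección
--     if df != 0:
--         df = int(df / abs(df))
--     if dc != 0:
--         dc = int(dc / abs(dc))
--     if (df, dc) not in direcciones_permitidas:
--         return False, None
--     # Verificar que la selección es continua en esa dirección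
--     for i in range(1, len(seleccion)):
--         pf, pc = seleccion[i-1]
--         cf, cc = seleccion[i]
--         if (cf - pf, cc - pc) != (df, dc):
--             return False, None
--     return True, (df, dc)
-- ===== SOURCE B (Python) =====
-- def es_seleccion_valida(seleccion, direcciones_permitidas):
--     if len(seleccion) < 2:
--         return False, None
--     f0, c0 = seleccion[0]
--     fL, cL = seleccion[-1]
--     df = (fL > f0) - (fL < f0)
--     dc = (cL > c0) - (cL < c0)
--     if (df, dc) not in direcciones_permitidas:
--         return False, None
--     for i, cell in enumerate(seleccion):
--         f, c = cell
--         if f != f0 + i * df or c != c0 + i * dc: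
--             return False, None
--     return True, (df, dc)
-- ===== Notes on version B (the rewrite author's own statement) =====
-- stated objective: alternative
-- what changed: Continuity is checked against each cell's expected absolute position f0+i*df, c0+i*dc via enumerate, instead of comparing every adjacent pair's delta; the direction is normalized with a branch-free sign expression instead of int(d/abs(d)).
import Mathlib
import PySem

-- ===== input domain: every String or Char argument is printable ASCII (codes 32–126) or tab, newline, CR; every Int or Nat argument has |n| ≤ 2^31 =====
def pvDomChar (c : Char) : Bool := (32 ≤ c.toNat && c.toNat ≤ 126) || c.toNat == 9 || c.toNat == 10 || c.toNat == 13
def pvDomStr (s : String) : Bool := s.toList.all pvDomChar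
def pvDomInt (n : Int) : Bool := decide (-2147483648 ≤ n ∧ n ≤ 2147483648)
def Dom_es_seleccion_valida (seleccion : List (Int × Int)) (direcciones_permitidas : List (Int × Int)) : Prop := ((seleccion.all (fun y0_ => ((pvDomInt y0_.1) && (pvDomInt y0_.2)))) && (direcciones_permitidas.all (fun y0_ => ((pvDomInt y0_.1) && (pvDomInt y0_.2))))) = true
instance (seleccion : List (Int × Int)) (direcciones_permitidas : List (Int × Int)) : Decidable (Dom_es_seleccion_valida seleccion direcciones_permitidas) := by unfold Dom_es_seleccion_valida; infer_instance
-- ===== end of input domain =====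

-- B checks continuity against each cell's expected absolute position (enumerate) instead of
-- A's adjacent-pair deltas, and normalizes the direction with a branch-free sign expression;
-- objective: alternative decomposition, same cost.

-- ===== PORT A =====
-- the 'for i in range(1, len(seleccion))' loop; returns false = the Python 'return False, None'
def pvALoop (sel : List (Int × Int)) (df dc : Int) : List Int → Bool
  | [] => true
  | i :: rest =>
    match PySem.List.pyGet? sel (i - 1), PySem.List.pyGet? sel i with
    | some (pf, pc), some (cf, cc) =>
        if (cf - pf, cc - pc) ≠ (df, dc) then false else pvALoop sel df dc rest
    | _, _ => false  -- unreachable: range(1, len) indices are in bounds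

def es_seleccion_valida (seleccion : List (Int × Int)) (direcciones_permitidas : List (Int × Int)) : Bool × (Option (Int × Int)) :=
  if seleccion.length < 2 then (false, none) else
  match PySem.List.pyGet? seleccion 0, PySem.List.pyGet? seleccion (-1) with
  | some (f0, c0), some (f1, c1) =>
    let df0 := f1 - f0
    let dc0 := c1 - c0
    -- int(df / abs(df)) = sign of df: the true quotient is exactly ±1, so the float division is exact
    let df := if df0 ≠ 0 then (if df0 > 0 then (1 : Int) else -1) else df0
    let dc := if dc0 ≠ 0 then (if dc0 > 0 then (1 : Int) else -1) else dc0
    if (df, dc) ∉ direcciones_permitidas then (false, none)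
    else if pvALoop seleccion df dc (PySem.List.pyRange 1 (seleccion.length : Int) 1) then (true, some (df, dc))
    else (false, none)
  | _, _ => (false, none)  -- unreachable: length ≥ 2

-- ===== PORT B =====
-- the 'for i, cell in enumerate(seleccion)' loop of Source B
def pvBLoop (f0 c0 df dc : Int) : List (Int × (Int × Int)) → Bool
  | [] => true
  | (i, (f, c)) :: rest =>
    if f ≠ f0 + i * df ∨ c ≠ c0 + i * dc then false
    else pvBLoop f0 c0 df dc rest

def es_seleccion_valida_alt (seleccion : List (Int × Int)) (direcciones_permitidas : List (Int × Int)) : Bool × (Option (Int × Int)) :=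
  if seleccion.length < 2 then (false, none) else
  match PySem.List.pyGet? seleccion 0, PySem.List.pyGet? seleccion (-1) with
  | some (f0, c0), some (fL, cL) =>
    -- (fL > f0) - (fL < f0): branch-free sign
    let df := (if f0 < fL then (1 : Int) else 0) - (if fL < f0 then 1 else 0)
    let dc := (if c0 < cL then (1 : Int) else 0) - (if cL < c0 then 1 else 0)
    if (df, dc) ∉ direcciones_permitidas then (false, none)
    else if pvBLoop f0 c0 df dc (PySem.List.enumerate seleccion 0) then (true, some (df, dc))
    else (false, none)
  | _, _ => (false, none)  -- unreachable: length ≥ 2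

-- ===== PRECONDITION & SPEC =====
def Spec_es_seleccion_valida (seleccion : List (Int × Int)) (direcciones_permitidas : List (Int × Int)) (out : Bool × (Option (Int × Int))) : Prop := out = es_seleccion_valida_alt seleccion direcciones_permitidas
instance (seleccion : List (Int × Int)) (direcciones_permitidas : List (Int × Int)) (out : Bool × (Option (Int × Int))) : Decidable (Spec_es_seleccion_valida seleccion direcciones_permitidas out) := by unfold Spec_es_seleccion_valida; infer_instance

-- ===== CLAIM (what is proved, stated in full; the proofs are below) =====
def Claim_equal_es_seleccion_valida : Prop := ∀ (seleccion : List (Int × Int)) (direcciones_permitidas : List (Int × Int)), Dom_es_seleccion_valida seleccion direcciones_permitidas → Spec_es_seleccion_valida seleccion direcciones_permitidas (es_seleccion_valida seleccion direcciones_permitidas)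

-- ===== LEMMAS AND PROOFS =====

-- the two sign normalizations agree
theorem pv_sign_eq (a b : Int) :
    (if b - a ≠ 0 then (if b - a > 0 then (1 : Int) else -1) else b - a)
      = (if a < b then (1 : Int) else 0) - (if b < a then 1 else 0) := by
  split_ifs <;> omega

theorem pvALoop_iff_aux (sel : List (Int × Int)) (df dc : Int) :
    ∀ (n k : Nat), sel.length - k ≤ n → 1 ≤ k →
    (pvALoop sel df dc (PySem.List.pyRange (k : Int) (sel.length : Int) 1) = true ↔
      ∀ j : Nat, k ≤ j → j < sel.length →
        ((sel.getD j (0, 0)).1 - (sel.getD (j - 1) (0, 0)).1,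
         (sel.getD j (0, 0)).2 - (sel.getD (j - 1) (0, 0)).2) = (df, dc)) := by
  intro n
  induction n with
  | zero =>
    intro k hle hk
    have hlen : sel.length ≤ k := by omega
    rw [PySem.List.pyRange_one_eq_nil (by exact_mod_cast hlen)]
    simp only [pvALoop]
    constructor
    · intro _ j hkj hj; omega
    · intro _; trivial
  | succ n ih =>
    intro k hle hk
    by_cases h : k < sel.length
    · have hk1 : (k : Int) < (sel.length : Int) := by exact_mod_cast h
      rw [PySem.List.pyRange_one_cons hk1]
      have e1 : PySem.List.pyGet? sel ((k : Int) - 1) = some (sel.getD (k - 1) (0, 0)) := by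
        have hc : (k : Int) - 1 = ((k - 1 : Nat) : Int) := by omega
        rw [hc, PySem.List.pyGet?_natCast, List.getElem?_eq_getElem (by omega),
          List.getD_eq_getElem sel (0,0) (by omega)]
      have e2 : PySem.List.pyGet? sel (k : Int) = some (sel.getD k (0, 0)) := by
        rw [PySem.List.pyGet?_natCast, List.getElem?_eq_getElem (by omega),
          List.getD_eq_getElem sel (0,0) (by omega)]
      rcases hP : sel.getD (k - 1) (0, 0) with ⟨pf, pc⟩
      rcases hC : sel.getD k (0, 0) with ⟨cf, cc⟩
      rw [hP] at e1; rw [hC] at e2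
      have hcast : (k : Int) + 1 = ((k + 1 : Nat) : Int) := by push_cast; ring
      rw [pvALoop, e1, e2, hcast]
      show (if (cf - pf, cc - pc) ≠ (df, dc) then false
            else pvALoop sel df dc (PySem.List.pyRange ((k + 1 : Nat) : Int) (sel.length : Int) 1)) = true ↔ _
      by_cases hne : (cf - pf, cc - pc) ≠ (df, dc)
      · rw [if_pos hne]
        constructor
        · intro hh; cases hh
        · intro hall
          have hkk := hall k (le_refl k) h
          rw [hP, hC] at hkk
          exact absurd hkk hne
      · rw [if_neg hne]
        rw [ih (k + 1) (by omega) (by omega)]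
        rw [not_ne_iff] at hne
        constructor
        · intro hall j hkj hj
          rcases Nat.eq_or_lt_of_le hkj with rfl | hlt
          · rw [hP, hC]; exact hne
          · exact hall j hlt hj
        · intro hall j hkj hj
          exact hall j (by omega) hj
    · have hlen : sel.length ≤ k := by omega
      rw [PySem.List.pyRange_one_eq_nil (by exact_mod_cast hlen)]
      simp only [pvALoop]
      constructor
      · intro _ j hkj hj; omega
      · intro _; trivial
theorem pvBLoop_iff (xs : List (Int × Int)) (f0 c0 df dc : Int) (k : Nat) :
    pvBLoop f0 c0 df dc (PySem.List.enumerate xs (k : Int)) = true ↔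
      ∀ i : Nat, i < xs.length →
        xs.getD i (0, 0) = (f0 + ((k : Int) + i) * df, c0 + ((k : Int) + i) * dc) := by
  induction xs generalizing k with
  | nil => simp [PySem.List.enumerate_nil, pvBLoop]
  | cons x xs ih =>
    obtain ⟨f, c⟩ := x
    rw [PySem.List.enumerate_cons, pvBLoop]
    have hcast : (k : Int) + 1 = ((k + 1 : Nat) : Int) := by push_cast; ring
    rw [hcast]
    by_cases hne : f ≠ f0 + (k : Int) * df ∨ c ≠ c0 + (k : Int) * dc
    · rw [if_pos hne]
      constructor
      · intro h; cases h
      · intro h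
        have h0 := h 0 (by simp)
        simp [Prod.ext_iff] at h0
        rcases hne with hne | hne
        · exact (hne h0.1).elim
        · exact (hne h0.2).elim
    · rw [if_neg hne, ih]
      rw [not_or, not_ne_iff, not_ne_iff] at hne
      constructor
      · intro h i hi
        cases i with
        | zero => simp [hne.1, hne.2]
        | succ i =>
          have := h i (by simpa using hi)
          simpa [add_assoc, add_comm, add_left_comm] using this
      · intro h i hi
        have := h (i + 1) (by simpa using hi)
        simpa [add_assoc, add_comm, add_left_comm] using this

-- the adjacent-delta condition and the absolute-position condition coincide
theorem pv_bridge (sel : List (Int × Int)) (f0 c0 df dc : Int)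
    (h0 : sel.getD 0 (0, 0) = (f0, c0)) :
    (∀ j : Nat, 1 ≤ j → j < sel.length →
        ((sel.getD j (0, 0)).1 - (sel.getD (j - 1) (0, 0)).1,
         (sel.getD j (0, 0)).2 - (sel.getD (j - 1) (0, 0)).2) = (df, dc)) ↔
      (∀ i : Nat, i < sel.length →
        sel.getD i (0, 0) = (f0 + (i : Int) * df, c0 + (i : Int) * dc)) := by
  constructor
  · intro h i
    induction i with
    | zero => intro _; simpa using h0
    | succ i ihi =>
      intro hi
      have habs := ihi (by omega)
      have hd := h (i + 1) (by omega) hi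
      have h1 : (sel.getD (i + 1) (0, 0)).1 = (sel.getD i (0, 0)).1 + df := by
        have hx := congrArg Prod.fst hd
        simp only [Nat.add_sub_cancel] at hx
        exact Int.sub_eq_iff_eq_add'.mp hx
      have h2 : (sel.getD (i + 1) (0, 0)).2 = (sel.getD i (0, 0)).2 + dc := by
        have hx := congrArg Prod.snd hd
        simp only [Nat.add_sub_cancel] at hx
        exact Int.sub_eq_iff_eq_add'.mp hx
      have := Prod.ext_iff.mp habs
      apply Prod.ext_iff.mpr
      constructor
      · rw [h1, this.1]; push_cast; ring
      · rw [h2, this.2]; push_cast; ring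
  · intro h j h1 h2
    have ha := h j h2
    have hb := h (j - 1) (by omega)
    have hc : ((j - 1 : Nat) : Int) = (j : Int) - 1 := by omega
    rw [ha, hb, hc]
    apply Prod.ext_iff.mpr
    constructor <;> (simp; ring)

-- ===== VERDICT (by name: the statement is the Claim_ definition above) =====
theorem es_seleccion_valida_spec : Claim_equal_es_seleccion_valida := by
  unfold Claim_equal_es_seleccion_valida
  intro sel dirs _
  unfold Spec_es_seleccion_valida es_seleccion_valida es_seleccion_valida_alt
  by_cases hlen : sel.length < 2
  · rw [if_pos hlen, if_pos hlen]
  · rw [if_neg hlen, if_neg hlen]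
    have hnz : 0 < sel.length := by omega
    have h0 : PySem.List.pyGet? sel 0 = some (sel.getD 0 (0, 0)) := by
      rw [PySem.List.pyGet?_zero, List.getElem?_eq_getElem (by omega),
        List.getD_eq_getElem sel (0,0) (by omega)]
    have hL : PySem.List.pyGet? sel (-1) = some (sel.getD (sel.length - 1) (0, 0)) := by
      rw [PySem.List.pyGet?_neg_one, List.getLast?_eq_getElem?,
        List.getElem?_eq_getElem (by omega), List.getD_eq_getElem sel (0,0) (by omega)]
    rcases hH : sel.getD 0 (0, 0) with ⟨f0, c0⟩
    rcases hT : sel.getD (sel.length - 1) (0, 0) with ⟨f1, c1⟩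
    rw [hH] at h0; rw [hT] at hL
    rw [h0, hL]
    dsimp only
    rw [pv_sign_eq f0 f1, pv_sign_eq c0 c1]
    by_cases hmem : ((if f0 < f1 then (1 : Int) else 0) - (if f1 < f0 then 1 else 0),
        (if c0 < c1 then (1 : Int) else 0) - (if c1 < c0 then 1 else 0)) ∉ dirs
    · rw [if_pos hmem, if_pos hmem]
    · rw [if_neg hmem, if_neg hmem]
      have hloops : ∀ df dc : Int,
          pvALoop sel df dc (PySem.List.pyRange 1 (sel.length : Int) 1)
            = pvBLoop f0 c0 df dc (PySem.List.enumerate sel 0) := by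
        intro df dc
        rw [Bool.eq_iff_iff]
        have hA := pvALoop_iff_aux sel df dc sel.length 1 (by omega) (le_refl 1)
        have hB := pvBLoop_iff sel f0 c0 df dc 0
        rw [show ((1 : Nat) : Int) = 1 by norm_num] at hA
        rw [show ((0 : Nat) : Int) = 0 by norm_num] at hB
        rw [hA, hB, pv_bridge sel f0 c0 df dc hH]
        constructor
        · intro h i hi; simpa using h i hi
        · intro h i hi; simpa using h i hi
      rw [hloops]
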